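-- pv_equiv track=rewrite | github.com/sueszli/vector-database-benchmark | dataset/python-mutated/worksheet.py | _sort_pagebreaks
-- ===== SOURCE A (Python) =====
-- def _sort_pagebreaks(breaks):
--     if False:
--         while True:
--             i = 10
--     if not breaks:
--         return
--     breaks_set = set(breaks)
--     if 0 in breaks_set:
--         breaks_set.remove(0)
--     breaks_list = list(breaks_set)
--     breaks_list.sort()
--     max_num_breaks = 1023
--     if len(breaks_list) > max_num_breaks:
--         breaks_list = breaks_list[:max_num_breaks]
--     return breaks_list
-- ===== SOURCE B (Python) =====
-- def _sort_pagebreaks(breaks):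
--     if not breaks:
--         return
--     result = []
--     for b in sorted(breaks):
--         if b == 0 or (result and result[-1] == b):
--             continue
--         result.append(b)
--         if len(result) == 1023:
--             break
--     return result
-- ===== Notes on version B (the rewrite author's own statement) =====
-- stated objective: alternative
-- what changed: Replaced hash-set dedup + sort + slice by a single sort of the raw input followed by one linear pass that skips zeros and adjacent duplicates and stops once 1023 entries are collected.
import Mathlib
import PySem

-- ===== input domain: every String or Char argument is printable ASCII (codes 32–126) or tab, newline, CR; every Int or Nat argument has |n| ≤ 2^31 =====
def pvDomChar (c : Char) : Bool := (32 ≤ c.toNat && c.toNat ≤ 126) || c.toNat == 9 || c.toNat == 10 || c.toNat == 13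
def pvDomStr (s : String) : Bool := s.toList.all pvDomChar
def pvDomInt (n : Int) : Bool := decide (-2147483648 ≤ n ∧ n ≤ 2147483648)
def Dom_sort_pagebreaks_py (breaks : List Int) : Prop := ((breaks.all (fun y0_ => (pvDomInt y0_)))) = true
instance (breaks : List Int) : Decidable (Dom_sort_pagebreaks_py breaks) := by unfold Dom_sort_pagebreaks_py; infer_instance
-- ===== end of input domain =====

-- B replaces A's hash-set dedup + sort + slice by one sort followed by a single linear
-- pass that skips zeros and adjacent duplicates and stops at 1023 entries (objective: alternative).


-- ===== PORT A =====
def sort_pagebreaks_py (breaks : List Int) : Option (List Int) :=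
  if breaks = [] then none            -- 'if not breaks: return'
  else
    let breaks_set := PySem.Set.ofList breaks
    -- 'if 0 in breaks_set: breaks_set.remove(0)' — remove of a PRESENT element = discard
    let breaks_set := if PySem.Set.contains breaks_set 0 then PySem.Set.discard breaks_set 0 else breaks_set
    let breaks_list := PySem.List.sorted breaks_set (fun x => x) false
    let max_num_breaks : Int := 1023
    some (if (breaks_list.length : Int) > max_num_breaks
          then PySem.List.slice breaks_list none (some max_num_breaks)
          else breaks_list)

-- ===== PORT B =====
-- the loop 'for b in sorted(breaks): …' with accumulator 'result'
def sortPagebreaksLoop : List Int → List Int → List Int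
  | [], result => result
  | b :: rest, result =>
    if b = 0 ∨ result.getLast? = some b then sortPagebreaksLoop rest result   -- 'continue'
    else
      let result := result ++ [b]                                            -- 'result.append(b)'
      if result.length = 1023 then result                                    -- 'break'
      else sortPagebreaksLoop rest result

def sort_pagebreaks_py_alt (breaks : List Int) : Option (List Int) :=
  if breaks = [] then none
  else some (sortPagebreaksLoop (PySem.List.sorted breaks (fun x => x) false) [])

-- ===== PRECONDITION & SPEC =====
def Spec_sort_pagebreaks_py (breaks : List Int) (out : Option (List Int)) : Prop := out = sort_pagebreaks_py_alt breaks
instance (breaks : List Int) (out : Option (List Int)) : Decidable (Spec_sort_pagebreaks_py breaks out) := by unfold Spec_sort_pagebreaks_py; infer_instance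

-- ===== CLAIM (what is proved, stated in full; the proofs are below) =====
def Claim_equal_sort_pagebreaks_py : Prop := ∀ (breaks : List Int), Dom_sort_pagebreaks_py breaks → Spec_sort_pagebreaks_py breaks (sort_pagebreaks_py breaks)

-- ===== LEMMAS AND PROOFS =====

-- the uncapped unique pass: what B's loop appends, given the value last appended so far
def upass : List Int → Option Int → List Int
  | [], _ => []
  | b :: rest, prev =>
    if b = 0 ∨ some b = prev then upass rest prev else b :: upass rest (some b)

theorem sortPagebreaksLoop_eq_upass (xs acc : List Int) (hlen : acc.length < 1023) :
    sortPagebreaksLoop xs acc = (acc ++ upass xs acc.getLast?).take 1023 := by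
  induction xs generalizing acc with
  | nil =>
    simp [sortPagebreaksLoop, upass, List.take_of_length_le (by omega : acc.length ≤ 1023)]
  | cons b rest ih =>
    simp only [sortPagebreaksLoop, upass]
    by_cases hskip : b = 0 ∨ acc.getLast? = some b
    · rw [if_pos hskip, if_pos (by exact hskip.imp id Eq.symm), ih acc hlen]
    · rw [if_neg hskip, if_neg (show ¬(b = 0 ∨ some b = acc.getLast?) from
        fun h => hskip (h.imp id Eq.symm))]
      have hlast : (acc ++ [b]).getLast? = some b := by simp
      by_cases hfull : (acc ++ [b]).length = 1023
      · rw [if_pos hfull]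
        have : (acc ++ b :: upass rest (some b)) = (acc ++ [b]) ++ upass rest (some b) := by simp
        rw [this, ← hfull, List.take_left]
      · rw [if_neg hfull, ih (acc ++ [b]) (by simp at hfull ⊢; omega), hlast]
        simp

-- all elements of 'upass xs prev' are nonzero, strictly increasing, above prev, and drawn from xs
theorem upass_sound (xs : List Int) (prev : Option Int)
    (hs : xs.Pairwise (· ≤ ·)) (hbound : ∀ p, prev = some p → ∀ x ∈ xs, p ≤ x) :
    (upass xs prev).Pairwise (· < ·) ∧
    (∀ y ∈ upass xs prev, y ∈ xs ∧ y ≠ 0 ∧ ∀ p, prev = some p → p < y) := by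
  induction xs generalizing prev with
  | nil => simp [upass]
  | cons b rest ih =>
    rcases List.pairwise_cons.mp hs with ⟨hb, hrest⟩
    simp only [upass]
    by_cases hskip : b = 0 ∨ some b = prev
    · rw [if_pos hskip]
      have := ih prev hrest (fun p hp x hx => hbound p hp x (List.mem_cons_of_mem _ hx))
      exact ⟨this.1, fun y hy => ⟨List.mem_cons_of_mem _ (this.2 y hy).1, (this.2 y hy).2.1,
        (this.2 y hy).2.2⟩⟩
    · rw [if_neg hskip]
      rw [not_or] at hskip
      have hrec := ih (some b) hrest
        (by intro p hp x hx; obtain rfl := Option.some.inj hp; exact hb x hx)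
      constructor
      · refine List.pairwise_cons.mpr ⟨fun y hy => ?_, hrec.1⟩
        exact ((hrec.2 y hy).2.2 b rfl)
      · intro y hy
        rcases List.mem_cons.mp hy with rfl | hy
        · refine ⟨List.mem_cons_self, hskip.1, ?_⟩
          rintro p rfl
          exact lt_of_le_of_ne (hbound p rfl y List.mem_cons_self) (fun h => hskip.2 (congrArg some h.symm))
        · obtain ⟨hmem, hnz, hgt⟩ := hrec.2 y hy
          refine ⟨List.mem_cons_of_mem _ hmem, hnz, ?_⟩
          rintro p rfl
          exact lt_trans (lt_of_le_of_ne (hbound p rfl b List.mem_cons_self)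
            (fun h => hskip.2 (congrArg some h.symm))) (hgt b rfl)

-- every nonzero, non-prev element of xs appears in 'upass xs prev'
theorem upass_complete (xs : List Int) (prev : Option Int) (y : Int)
    (hy : y ∈ xs) (hnz : y ≠ 0) (hp : ∀ p, prev = some p → y ≠ p) :
    y ∈ upass xs prev := by
  induction xs generalizing prev with
  | nil => cases hy
  | cons b rest ih =>
    simp only [upass]
    by_cases hskip : b = 0 ∨ some b = prev
    · rw [if_pos hskip]
      rcases List.mem_cons.mp hy with rfl | hy'
      · rcases hskip with rfl | hbp
        · exact absurd rfl hnz
        · exact absurd rfl (hp y hbp.symm)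
      · exact ih prev hy' hp
    · rw [if_neg hskip]
      rcases List.mem_cons.mp hy with rfl | hy'
      · exact List.mem_cons_self
      · by_cases hyb : y = b
        · exact hyb ▸ List.mem_cons_self
        · exact List.mem_cons_of_mem _ (ih (some b) hy' (fun p hpb => (Option.some.inj hpb) ▸ hyb))

-- A's deduplicated zero-free set, sorted, equals B's single pass over the sorted input
theorem sorted_removed_eq_upass (breaks : List Int) :
    PySem.List.sorted
      (if PySem.Set.contains (PySem.Set.ofList breaks) 0
       then PySem.Set.discard (PySem.Set.ofList breaks) 0
       else PySem.Set.ofList breaks) (fun x => x) false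
    = upass (PySem.List.sorted breaks (fun x => x) false) none := by
  set S := PySem.List.sorted breaks (fun x => x) false with hS
  have hsortS : S.Pairwise (· ≤ ·) := PySem.List.sorted_pairwise breaks (fun x => x)
  have hu := upass_sound S none hsortS (by simp)
  set R := if PySem.Set.contains (PySem.Set.ofList breaks) 0
       then PySem.Set.discard (PySem.Set.ofList breaks) 0
       else PySem.Set.ofList breaks with hR
  have hmemR : ∀ y, y ∈ R ↔ y ∈ breaks ∧ y ≠ 0 := by
    intro y
    rw [hR]
    split_ifs with h0
    · rw [PySem.Set.mem_discard, PySem.Set.mem_ofList]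
    · rw [PySem.Set.mem_ofList]
      have : (0 : Int) ∉ breaks := by
        rw [← PySem.Set.mem_ofList]
        intro hmem
        exact h0 ((PySem.Set.contains_iff _ _).mpr hmem)
      exact ⟨fun hy => ⟨hy, fun h => this (h ▸ hy)⟩, fun hy => hy.1⟩
  have hnodupR : R.Nodup := by
    rw [hR]; split_ifs
    · exact PySem.Set.nodup_discard _ _ (PySem.Set.nodup_ofList breaks)
    · exact PySem.Set.nodup_ofList breaks
  apply PySem.List.sorted_eq_of_perm_of_pairwise_lt
  · apply (List.perm_ext_iff_of_nodup (hu.1.nodup) hnodupR).mpr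
    intro y
    rw [hmemR y]
    constructor
    · intro hy
      obtain ⟨hmem, hnz, _⟩ := hu.2 y hy
      exact ⟨(PySem.List.mem_sorted breaks (fun x => x) false y).mp hmem, hnz⟩
    · rintro ⟨hy, hnz⟩
      exact upass_complete S none y ((PySem.List.mem_sorted breaks (fun x => x) false y).mpr hy) hnz (by simp)
  · exact hu.1

-- A's final cap 'if len > 1023 then l[:1023] else l' is 'take 1023'
theorem cap_eq_take (l : List Int) :
    (if (l.length : Int) > 1023 then PySem.List.slice l none (some 1023) else l) = l.take 1023 := by
  split_ifs with h
  · rw [PySem.List.slice_to l (by norm_num)]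
    congr 1
  · rw [List.take_of_length_le (by omega)]

-- ===== VERDICT (by name: the statement is the Claim_ definition above) =====
theorem sort_pagebreaks_py_spec : Claim_equal_sort_pagebreaks_py := by
  intro breaks _
  unfold Spec_sort_pagebreaks_py sort_pagebreaks_py sort_pagebreaks_py_alt
  by_cases h : breaks = []
  · simp [h]
  · rw [if_neg h, if_neg h]
    rw [sortPagebreaksLoop_eq_upass _ [] (by simp)]
    simp only [List.getLast?_nil, List.nil_append]
    rw [← sorted_removed_eq_upass breaks, ← cap_eq_take]
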